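-- pv_equiv track=rewrite | github.com/justaVinz/trojan-input | src/plots.py | sort_evaluations
-- ===== SOURCE A (Python) =====
-- def sort_evaluations(evaluation_json: dict):
--     sorted_by_size = {}
--     for key, value in evaluation_json.items():
--         parts = key.split("_")
--         if len(parts) > 1:
--             size = parts[1]
--             if size not in sorted_by_size:
--                 sorted_by_size[size] = []
--             sorted_by_size[size].append({key: value})
--     return sorted_by_size
-- ===== SOURCE B (Python) =====
-- def sort_evaluations(evaluation_json: dict):
--     pairs = [(parts[1], {key: value})
--              for key, value in evaluation_json.items()
--              for parts in [key.split("_")]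
--              if len(parts) > 1]
--     sizes = list(dict.fromkeys(size for size, _ in pairs))
--     return {size: [entry for s, entry in pairs if s == size] for size in sizes}
-- ===== Notes on version B (the rewrite author's own statement) =====
-- stated objective: idiomatic
-- what changed: Replaces A's single-pass mutable-dict bucketing by a comprehension pipeline: tag each valid entry with its size, dedup the sizes in first-occurrence order (dict.fromkeys), then build each group by filtering the tagged list.
import Mathlib
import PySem

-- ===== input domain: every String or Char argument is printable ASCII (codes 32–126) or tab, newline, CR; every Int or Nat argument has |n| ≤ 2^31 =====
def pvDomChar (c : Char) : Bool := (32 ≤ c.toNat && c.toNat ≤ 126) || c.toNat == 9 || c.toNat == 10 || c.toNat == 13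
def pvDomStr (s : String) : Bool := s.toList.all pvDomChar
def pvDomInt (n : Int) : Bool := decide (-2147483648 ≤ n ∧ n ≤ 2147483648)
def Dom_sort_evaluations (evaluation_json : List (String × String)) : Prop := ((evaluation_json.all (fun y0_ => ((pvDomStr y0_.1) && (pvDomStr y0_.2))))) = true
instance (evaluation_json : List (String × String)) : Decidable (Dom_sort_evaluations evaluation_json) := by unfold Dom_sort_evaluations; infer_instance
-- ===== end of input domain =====

-- B replaces A's single-pass dict bucketing by a comprehension pipeline (tag valid entries,
-- dedup the sizes, gather each group by filtering); objective: idiomatic, same return value.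

-- ===== PORT A =====
-- literal transliteration of A: one fold over the items, mutating a dict of buckets
def sort_evaluations (evaluation_json : List (String × String)) : List (String × List (List (String × String))) :=
  (evaluation_json.foldl (fun sorted_by_size kv =>
      let parts := (PySem.Str.split? kv.1 "_").getD []   -- sep "_" ≠ "": split? is always some
      if parts.length > 1 then
        let size := PySem.List.pyGetD parts 1 ""          -- parts[1]; in range since length > 1
        let sorted_by_size :=
          if sorted_by_size.contains size then sorted_by_size
          else sorted_by_size.insert size []
        sorted_by_size.modify size [] (fun l => l ++ [[(kv.1, kv.2)]])
      else sorted_by_size)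
    PySem.Dict.empty).items

-- ===== PORT B =====
-- literal transliteration of B: pairs comprehension, ordered dedup of sizes, filter per size
def sort_evaluations_alt (evaluation_json : List (String × String)) : List (String × List (List (String × String))) :=
  let pairs : List (String × List (String × String)) :=
    evaluation_json.filterMap (fun kv =>
      let parts := (PySem.Str.split? kv.1 "_").getD []   -- sep "_" ≠ "": split? is always some
      if parts.length > 1 then some (PySem.List.pyGetD parts 1 "", [(kv.1, kv.2)]) else none)
  let sizes := PySem.List.dedup (pairs.map Prod.fst)     -- list(dict.fromkeys(…))
  sizes.map (fun size => (size, (pairs.filter (fun p => p.1 == size)).map Prod.snd))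

-- ===== PRECONDITION & SPEC =====
def Spec_sort_evaluations (evaluation_json : List (String × String)) (out : List (String × List (List (String × String)))) : Prop := out = sort_evaluations_alt evaluation_json
instance (evaluation_json : List (String × String)) (out : List (String × List (List (String × String)))) : Decidable (Spec_sort_evaluations evaluation_json out) := by unfold Spec_sort_evaluations; infer_instance

-- ===== CLAIM (what is proved, stated in full; the proofs are below) =====
def Claim_equal_sort_evaluations : Prop := ∀ (evaluation_json : List (String × String)), Dom_sort_evaluations evaluation_json → Spec_sort_evaluations evaluation_json (sort_evaluations evaluation_json)

-- ===== LEMMAS AND PROOFS =====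

-- inserting [] just before modifying the same (absent) key is the same as modifying directly
theorem insert_nil_modify {κ : Type} [BEq κ] [LawfulBEq κ]
    (d : PySem.Dict κ (List (List (String × String)))) (k : κ)
    (f : List (List (String × String)) → List (List (String × String)))
    (h : d.contains k = false) :
    (d.insert k []).modify k [] f = d.modify k [] f := by
  simp [PySem.Dict.modify, PySem.Dict.getD_insert_self, PySem.Dict.insert_insert_self,
        PySem.Dict.getD_of_not_contains d [] h]

-- A's fold step equals the plain modify step
theorem stepA_eq_modify (d : PySem.Dict String (List (List (String × String))))
    (p : String × List (String × String)) :
    (let d' := if d.contains p.1 then d else d.insert p.1 []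
     d'.modify p.1 [] (fun l => l ++ [p.2])) = d.modify p.1 [] (fun l => l ++ [p.2]) := by
  by_cases hc : d.contains p.1
  · simp [hc]
  · simp only [hc]
    exact insert_nil_modify d p.1 _ (by simpa using hc)

-- the modify-fold over any pairs list equals B's dedup+filter grouping
theorem dict_group (P : List (String × List (String × String))) :
    (P.foldl (fun d p => d.modify p.1 [] (fun l => l ++ [p.2])) PySem.Dict.empty).items
      = (PySem.List.dedup (P.map Prod.fst)).map
          (fun s => (s, (P.filter (fun p => p.1 == s)).map Prod.snd)) := by
  have hnd : (P.foldl (fun d p => d.modify p.1 [] (fun l => l ++ [p.2])) PySem.Dict.empty).keys.Nodup :=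
    PySem.Dict.nodup_keys_foldl_modify_key P Prod.fst [] (fun _ p => fun l => l ++ [p.2])
      PySem.Dict.empty (by simp)
  rw [PySem.Dict.items_eq_map_keys _ hnd []]
  rw [PySem.Dict.keys_foldl_modify_key P Prod.fst [] (fun _ p => fun l => l ++ [p.2]) PySem.Dict.empty]
  simp only [PySem.Dict.keys_empty, PySem.Set.update_nil_left, PySem.List.dedup_eq_ofList]
  refine List.map_congr_left (fun s _ => ?_)
  rw [PySem.Dict.getD_foldl_modify_append P PySem.Dict.empty s]
  simp [PySem.Dict.getD_empty]

-- ===== VERDICT (by name: the statement is the Claim_ definition above) =====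
theorem sort_evaluations_spec : Claim_equal_sort_evaluations := by
  intro ej _
  unfold Spec_sort_evaluations sort_evaluations sort_evaluations_alt
  have hfold : ∀ (l : List (String × String)) (d : PySem.Dict String (List (List (String × String)))),
      l.foldl (fun sorted_by_size kv =>
        let parts := (PySem.Str.split? kv.1 "_").getD []
        if parts.length > 1 then
          let size := PySem.List.pyGetD parts 1 ""
          let sorted_by_size :=
            if sorted_by_size.contains size then sorted_by_size
            else sorted_by_size.insert size []
          sorted_by_size.modify size [] (fun l => l ++ [[(kv.1, kv.2)]])
        else sorted_by_size) d
      = (l.filterMap (fun kv =>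
          let parts := (PySem.Str.split? kv.1 "_").getD []
          if parts.length > 1 then some (PySem.List.pyGetD parts 1 "", [(kv.1, kv.2)]) else none)).foldl
          (fun d p => d.modify p.1 [] (fun l => l ++ [p.2])) d := by
    intro l
    induction l with
    | nil => intro d; rfl
    | cons kv t ih =>
      intro d
      by_cases hc : ((PySem.Str.split? kv.1 "_").getD []).length > 1
      · simp only [List.foldl_cons, List.filterMap_cons, hc, if_pos]
        rw [ih]
        congr 1
        exact stepA_eq_modify d (PySem.List.pyGetD ((PySem.Str.split? kv.1 "_").getD []) 1 "", [(kv.1, kv.2)])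
      · simp only [List.foldl_cons, List.filterMap_cons, hc, ite_false]
        exact ih d
  rw [hfold ej PySem.Dict.empty]
  exact dict_group _
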